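-- pv_equiv track=rewrite | github.com/Xiang-Chen1207/neuro_ptft | eeg_feature_extraction/config.py | _determine_hemisphere
-- ===== SOURCE A (Python) =====
-- def _determine_hemisphere(name: str) -> str:
--     """
--     根据电极名称确定其所属半球
--
--     规则（10-20/10-10系统）：
--     - 奇数编号（1,3,5,7,9）：左半球
--     - 偶数编号（2,4,6,8,10）：右半球
--     - Z结尾或纯字母：中线
--     - A1, T1, T9：左半球参考/颞区
--     - A2, T2, T10：右半球参考/颞区
--     """
--     name_upper = name.upper()
--
--     # 特殊情况
--     if name_upper in ('A1', 'T1', 'T9'):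
--         return 'left'
--     if name_upper in ('A2', 'T2', 'T10'):
--         return 'right'
--
--     # Z结尾为中线
--     if name_upper.endswith('Z'):
--         return 'midline'
--
--     # 提取末尾的数字
--     digits = ''
--     for char in reversed(name_upper):
--         if char.isdigit():
--             digits = char + digits
--         else:
--             break
--
--     if digits:
--         num = int(digits)
--         if num % 2 == 1:  # 奇数
--             return 'left'
--         else:  # 偶数
--             return 'right'
--
--     # 无数字的情况，默认中线
--     return 'midline'
-- ===== SOURCE B (Python) =====
-- def _determine_hemisphere(name: str) -> str:
--     s = name.upper()
--     i = len(s)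
--     while i and s[i - 1].isdigit():
--         i -= 1
--     if i == len(s):
--         return 'midline'
--     return 'left' if int(s[i:]) % 2 == 1 else 'right'
-- ===== Notes on version B (the rewrite author's own statement) =====
-- stated objective: simpler
-- what changed: B drops the six special-case lookups and the endswith-Z branch (both subsumed by the trailing-digit parity rule), and replaces the reversed-iteration string-accumulation loop with an index scan plus one slice.
import Mathlib
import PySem

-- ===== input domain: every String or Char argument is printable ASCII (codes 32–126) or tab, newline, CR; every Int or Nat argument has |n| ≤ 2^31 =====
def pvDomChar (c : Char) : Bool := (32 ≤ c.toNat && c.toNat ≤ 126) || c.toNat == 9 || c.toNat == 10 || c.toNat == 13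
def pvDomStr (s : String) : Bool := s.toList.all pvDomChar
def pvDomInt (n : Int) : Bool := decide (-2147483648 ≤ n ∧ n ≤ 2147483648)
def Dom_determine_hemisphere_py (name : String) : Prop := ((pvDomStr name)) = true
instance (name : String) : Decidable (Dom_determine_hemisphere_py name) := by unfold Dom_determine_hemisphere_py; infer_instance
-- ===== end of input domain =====

-- B is simpler: it drops the six special-case lookups and the endswith-'Z' branch (both subsumed
-- by the trailing-digit parity rule) and replaces A's reversed-iteration string-accumulation loop
-- with an index scan plus one slice.


-- ===== PORT A =====
-- the 'for char in reversed(name_upper): if char.isdigit(): digits = char + digits else: break' loop,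
-- iterating over the reversed list with 'digits' as accumulator
def pvDigitsLoop : List Char → List Char → List Char
  | [], digits => digits
  | c :: rest, digits =>
    if PySem.Chars.isdigit c then pvDigitsLoop rest (c :: digits) else digits

def determine_hemisphere_py (name : String) : String :=
  let name_upper := PySem.Chars.upper name.toList
  if name_upper = "A1".toList ∨ name_upper = "T1".toList ∨ name_upper = "T9".toList then "left"
  else if name_upper = "A2".toList ∨ name_upper = "T2".toList ∨ name_upper = "T10".toList then "right"
  else if PySem.Chars.endswith name_upper "Z".toList then "midline"
  else
    let digits := pvDigitsLoop name_upper.reverse []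
    if digits ≠ [] then
      -- int(digits): digits is non-empty and all ASCII digits, so Python's int() never raises;
      -- the '.getD 0' default is unreachable
      if PySem.Int.mod ((PySem.Int.ofChars? digits).getD 0) 2 = 1 then "left" else "right"
    else "midline"

-- ===== PORT B =====
-- 'while i and s[i-1].isdigit(): i -= 1', counting i down; s[i-1] is in range (0 ≤ i-1 < len s
-- whenever the loop body runs, starting from i = len s), so pyGetD with a dummy default is exact
def pvScanLoop (s : List Char) : Nat → Nat
  | 0 => 0
  | j + 1 =>
    if PySem.Chars.isdigit (PySem.List.pyGetD s (j : Int) ' ') then pvScanLoop s j else j + 1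

def determine_hemisphere_py_alt (name : String) : String :=
  let s := PySem.Chars.upper name.toList
  let i := pvScanLoop s s.length
  if i = s.length then "midline"
  else
    -- int(s[i:]): the slice is non-empty and all ASCII digits, so int() never raises; '.getD 0' unreachable
    if PySem.Int.mod ((PySem.Int.ofChars? (PySem.List.slice s (some (i : Int)) none)).getD 0) 2 = 1
    then "left" else "right"

-- ===== PRECONDITION & SPEC =====
def Spec_determine_hemisphere_py (name : String) (out : String) : Prop := out = determine_hemisphere_py_alt name
instance (name : String) (out : String) : Decidable (Spec_determine_hemisphere_py name out) := by unfold Spec_determine_hemisphere_py; infer_instance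

-- ===== CLAIM (what is proved, stated in full; the proofs are below) =====
def Claim_equal_determine_hemisphere_py : Prop := ∀ (name : String), Dom_determine_hemisphere_py name → Spec_determine_hemisphere_py name (determine_hemisphere_py name)

-- ===== LEMMAS AND PROOFS =====

-- A's accumulation loop collects the trailing digit run (reversed takeWhile, re-reversed)
theorem pvDigitsLoop_eq (l acc : List Char) :
    pvDigitsLoop l acc = (l.takeWhile PySem.Chars.isdigit).reverse ++ acc := by
  induction l generalizing acc with
  | nil => simp [pvDigitsLoop]
  | cons c rest ih =>
    by_cases h : PySem.Chars.isdigit c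
    · simp [pvDigitsLoop, h, ih]
    · simp [pvDigitsLoop, h]

-- B's scan, started at any i ≤ len s, stops at i minus the digit run at the end of (s.take i)
theorem pvScanLoop_eq (s : List Char) (i : Nat) (hi : i ≤ s.length) :
    pvScanLoop s i = i - ((s.take i).reverse.takeWhile PySem.Chars.isdigit).length := by
  induction i with
  | zero => simp [pvScanLoop]
  | succ j ih =>
    have hj : j < s.length := hi
    have hget : PySem.List.pyGetD s (j : Int) ' ' = s[j] := by
      simp [PySem.List.pyGetD_natCast, hj]
    have htake : (s.take (j + 1)).reverse = s[j] :: (s.take j).reverse := by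
      rw [List.take_add_one, List.getElem?_eq_getElem hj]
      simp
    rw [pvScanLoop, hget, htake]
    by_cases h : PySem.Chars.isdigit s[j]
    · have hlen : ((s.take j).reverse.takeWhile PySem.Chars.isdigit).length ≤ j := by
        calc ((s.take j).reverse.takeWhile PySem.Chars.isdigit).length
            ≤ (s.take j).reverse.length := (List.takeWhile_sublist _).length_le
          _ = (s.take j).length := by simp
          _ ≤ j := by simp
      rw [if_pos h, ih (le_of_lt hj), List.takeWhile_cons, if_pos h]
      simp only [List.length_cons]
      omega
    · rw [if_neg h, List.takeWhile_cons, if_neg h]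
      simp

-- the trailing digit run of s is the suffix s.drop (len - k), k its length
theorem pvDrop_eq_run (s : List Char) :
    s.drop (s.length - (s.reverse.takeWhile PySem.Chars.isdigit).length)
      = (s.reverse.takeWhile PySem.Chars.isdigit).reverse := by
  set t := s.reverse.takeWhile PySem.Chars.isdigit with ht
  have hpre : t <+: s.reverse := List.takeWhile_prefix _
  have hsuf : t.reverse <:+ s := by
    have h2 := (List.reverse_suffix (l₁ := t) (l₂ := s.reverse)).mpr hpre
    simpa using h2
  obtain ⟨p, hp⟩ := hsuf
  rw [← hp]
  have hlen : (p ++ t.reverse).length - t.length = p.length := by simp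
  rw [hlen, List.drop_left' rfl]

-- a list ending in a digit does not end in 'Z'
theorem pvNotEndswithZ (s : List Char) (c : Char) (rest : List Char)
    (hrev : s.reverse = c :: rest) (hc : PySem.Chars.isdigit c = true) :
    PySem.Chars.endswith s ("Z".toList) = false := by
  have hcz : c ≠ 'Z' := by
    intro h; subst h; simp [PySem.Chars.isdigit] at hc
  rw [PySem.Chars.endswith, Bool.eq_false_iff]
  intro htrue
  have hsuf : "Z".toList <:+ s := List.isSuffixOf_iff_suffix.mp htrue
  have hpre : ['Z'] <+: s.reverse := by
    have h2 := (List.reverse_prefix (l₁ := ['Z']) (l₂ := s)).mpr (by simpa using hsuf)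
    simpa using h2
  rw [hrev] at hpre
  rcases hpre with ⟨q, hq⟩
  exact hcz (by injection hq with h1 _; exact h1.symm)

-- core equality, stated over the uppercased character list both ports compute
theorem pvCore (u : List Char) :
    (if u = "A1".toList ∨ u = "T1".toList ∨ u = "T9".toList then "left"
     else if u = "A2".toList ∨ u = "T2".toList ∨ u = "T10".toList then "right"
     else if PySem.Chars.endswith u "Z".toList then "midline"
     else
       let digits := pvDigitsLoop u.reverse []
       if digits ≠ [] then
         if PySem.Int.mod ((PySem.Int.ofChars? digits).getD 0) 2 = 1 then "left" else "right"
       else "midline")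
    = (let i := pvScanLoop u u.length
       if i = u.length then "midline"
       else
         if PySem.Int.mod ((PySem.Int.ofChars? (PySem.List.slice u (some (i : Int)) none)).getD 0) 2 = 1
         then "left" else "right") := by
  have hscan : pvScanLoop u u.length
      = u.length - (u.reverse.takeWhile PySem.Chars.isdigit).length := by
    rw [pvScanLoop_eq u u.length le_rfl]; simp
  have hdig : pvDigitsLoop u.reverse [] = (u.reverse.takeWhile PySem.Chars.isdigit).reverse := by
    rw [pvDigitsLoop_eq]; simp
  set k := (u.reverse.takeWhile PySem.Chars.isdigit).length with hk
  have hkle : k ≤ u.length := by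
    calc k ≤ u.reverse.length := (List.takeWhile_sublist _).length_le
      _ = u.length := by simp
  by_cases hA1 : u = "A1".toList
  · subst hA1; decide
  by_cases hT1 : u = "T1".toList
  · subst hT1; decide
  by_cases hT9 : u = "T9".toList
  · subst hT9; decide
  by_cases hA2 : u = "A2".toList
  · subst hA2; decide
  by_cases hT2 : u = "T2".toList
  · subst hT2; decide
  by_cases hT10 : u = "T10".toList
  · subst hT10; decide
  rw [if_neg (by tauto), if_neg (by tauto)]
  by_cases hk0 : k = 0
  · -- no trailing digits: both sides give "midline"
    have hi : pvScanLoop u u.length = u.length := by rw [hscan, hk0, Nat.sub_zero]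
    have hdigs : pvDigitsLoop u.reverse [] = [] := by
      rw [hdig]
      have : (u.reverse.takeWhile PySem.Chars.isdigit) = [] := List.length_eq_zero_iff.mp hk0
      rw [this]; rfl
    rw [hi, if_pos rfl]
    split
    · rfl
    · simp [hdigs]
  · -- trailing digits exist: neither special cases nor the Z branch fire; both compute the same int
    have hkpos : 0 < k := Nat.pos_of_ne_zero hk0
    obtain ⟨c, rest, hrun⟩ : ∃ c rest, u.reverse.takeWhile PySem.Chars.isdigit = c :: rest := by
      cases h : u.reverse.takeWhile PySem.Chars.isdigit with
      | nil => rw [h] at hk; simp at hk; omega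
      | cons c rest => exact ⟨c, rest, rfl⟩
    have hcdig : PySem.Chars.isdigit c = true := by
      have hmem : c ∈ u.reverse.takeWhile PySem.Chars.isdigit := by
        rw [hrun]; exact List.mem_cons_self
      exact List.mem_takeWhile_imp hmem
    have hrev : ∃ rest', u.reverse = c :: rest' := by
      have hpre : c :: rest <+: u.reverse := hrun ▸ List.takeWhile_prefix _
      rcases hpre with ⟨q, hq⟩
      exact ⟨rest ++ q, by rw [← hq]; simp⟩
    obtain ⟨rest', hrev⟩ := hrev
    rw [if_neg (by rw [pvNotEndswithZ u c rest' hrev hcdig]; simp)]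
    have hislice : PySem.List.slice u (some ((u.length - k : Nat) : Int)) none
        = (u.reverse.takeWhile PySem.Chars.isdigit).reverse := by
      rw [PySem.List.slice_from_natCast]
      exact pvDrop_eq_run u
    have hine : ¬ u.length - k = u.length := by omega
    simp only [hscan, hdig]
    rw [if_neg hine]
    rw [hislice]
    have hne : (u.reverse.takeWhile PySem.Chars.isdigit).reverse ≠ [] := by
      rw [hrun]; simp
    rw [if_pos hne]

-- ===== VERDICT (by name: the statement is the Claim_ definition above) =====
theorem determine_hemisphere_py_spec : Claim_equal_determine_hemisphere_py := by
  intro name _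
  unfold Spec_determine_hemisphere_py determine_hemisphere_py determine_hemisphere_py_alt
  exact pvCore (PySem.Chars.upper name.toList)
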